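-- pv_equiv track=rewrite | github.com/hvg-concordia/XReason_plus | src/explainer.py | get_feature_categories
-- ===== SOURCE A (Python) =====
-- import collections
--
-- def make_varpos(ivars):
--         """
--             Traverse all the vars and get their positions in the list of inputs.
--         """
--         vpos, pos = {}, 0
--
--         for feat in ivars:
--             if len(ivars[feat]) == 2:
--                 for lit in ivars[feat]:
--                     if abs(lit) not in vpos:
--                         vpos[abs(lit)] = pos
--                         pos += 1
--             else:
--                 for lit in ivars[feat]:
--                     if abs(lit) not in vpos:
--                         vpos[abs(lit)] = pos
--                 pos += 1
--         return vpos
--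
-- def get_feature_categories(ivars,feature_names_as_array_strings):
--     """
--         Get the categories of features.
--     """
--     categories = collections.defaultdict(lambda: [])
--     ivars={str(k):v for k,v in ivars.items()}
--     # feature_names_as_array_strings=['0', '1', '2', '3']
--     vpos = make_varpos(ivars)
--     for f in feature_names_as_array_strings:
--         if f in ivars:
--             if len(ivars[f]) == 2:
--                 categories[f.split('_')[0]].append(vpos[ivars[f][0]])
--             else:
--                 for v in ivars[f]:
--                     # this has to be checked and updated
--                     categories[f].append(vpos[abs(v)])
--     # these are the result indices of features going together
--     fcats = [[min(ftups), max(ftups)] for ftups in categories.values()]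
--     return fcats
-- ===== SOURCE B (Python) =====
-- def _varpos(groups):
--     """Position table for absolute literal values: one unified double loop,
--     advancing per fresh literal (step=1) for two-literal groups and once per
--     group (step=0 inside, +1 after) otherwise."""
--     vpos, pos = {}, 0
--     for lits in groups:
--         step = 1 if len(lits) == 2 else 0
--         for a in map(abs, lits):
--             if a not in vpos:
--                 vpos[a] = pos
--                 pos += step
--         pos += 1 - step
--     return vpos
--
--
-- def _events(iv, vpos, f):
--     """The (category key, position) pairs one feature name contributes."""
--     if f not in iv:
--         return []
--     lits = iv[f]
--     if len(lits) == 2: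
--         return [(f.split('_')[0], vpos[lits[0]])]
--     return [(f, vpos[abs(v)]) for v in lits]
--
--
-- def get_feature_categories(ivars, feature_names_as_array_strings):
--     """Flatten the features to one (key, position) event list, then group:
--     distinct keys in first-seen order, min/max of each key's positions."""
--     iv = {str(k): v for k, v in ivars.items()}
--     vpos = _varpos(list(iv.values()))
--     events = [e for f in feature_names_as_array_strings for e in _events(iv, vpos, f)]
--     keys = list(dict.fromkeys(k for k, _ in events))
--     return [[min(p for k2, p in events if k2 == k),
--              max(p for k2, p in events if k2 == k)] for k in keys]
-- ===== Notes on version B (the rewrite author's own statement) =====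
-- stated objective: alternative
-- what changed: B replaces A's incremental defaultdict-of-position-lists with a flat (key, position) event list built in one comprehension, then groups it afterwards (ordered dedup of keys, min/max over each key's filtered positions); the position table is rebuilt as one unified double loop whose advance step (per-literal vs per-group) is arithmetic instead of two branch bodies.
import Mathlib
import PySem

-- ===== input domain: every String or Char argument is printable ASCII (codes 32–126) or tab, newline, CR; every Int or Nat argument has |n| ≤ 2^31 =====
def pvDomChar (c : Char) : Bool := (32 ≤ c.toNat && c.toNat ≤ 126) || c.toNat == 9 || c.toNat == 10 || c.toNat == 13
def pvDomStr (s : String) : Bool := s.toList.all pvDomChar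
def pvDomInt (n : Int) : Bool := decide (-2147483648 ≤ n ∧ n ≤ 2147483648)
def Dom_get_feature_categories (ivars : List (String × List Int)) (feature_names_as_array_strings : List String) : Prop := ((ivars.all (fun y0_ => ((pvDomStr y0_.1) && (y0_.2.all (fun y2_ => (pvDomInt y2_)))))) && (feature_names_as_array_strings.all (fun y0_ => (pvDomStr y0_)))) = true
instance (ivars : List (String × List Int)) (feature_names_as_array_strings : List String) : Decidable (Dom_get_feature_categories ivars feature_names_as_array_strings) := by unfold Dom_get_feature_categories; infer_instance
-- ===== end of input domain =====

-- B flattens the features to one (key, position) event list and groups it afterwards,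
-- instead of A's incremental defaultdict of per-category position lists (objective: alternative).

-- ===== PORT A =====

-- f.split('_')[0] : splitting on the nonempty separator "_" always yields a nonempty list
def pvSplit0 (f : String) : String := ((PySem.Str.split? f "_").getD []).headD ""

-- Python min(l) / max(l) on the nonempty lists this program builds ([] is unreachable)
def pvMinI (l : List Int) : Int := (PySem.List.min? l (fun x => x)).getD 0
def pvMaxI (l : List Int) : Int := (PySem.List.max? l (fun x => x)).getD 0

-- make_varpos: 'for feat in ivars: … ivars[feat] …' iterates the keys in order and looks
-- each one up; keys of a Dict are unique, so this is exactly a fold over d.items.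
def make_varpos (ivars : PySem.Dict String (List Int)) : PySem.Dict Int Int :=
  (ivars.items.foldl
    (fun (st : PySem.Dict Int Int × Int) kv =>
      if kv.2.length = 2 then
        kv.2.foldl (fun st2 lit =>
          if st2.1.contains |lit| then st2 else (st2.1.insert |lit| st2.2, st2.2 + 1)) st
      else
        (kv.2.foldl (fun vp lit =>
          if vp.contains |lit| then vp else vp.insert |lit| st.2) st.1, st.2 + 1))
    (PySem.Dict.empty, 0)).1

-- loop body of A's 'for f in feature_names…' (defaultdict append = modify with default []).
-- vpos[…] can raise KeyError in Python (len==2 with a negative first literal): that lookup is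
-- (vpos.get? …).getD 0 here, and exactly those inputs are excluded by Pre_.
def pvCatStep (ivars' : PySem.Dict String (List Int)) (vpos : PySem.Dict Int Int)
    (cats : PySem.Dict String (List Int)) (f : String) : PySem.Dict String (List Int) :=
  match ivars'.get? f with
  | some l =>
    if l.length = 2 then
      cats.modify (pvSplit0 f) [] (fun c => c ++ [(vpos.get? (l.headD 0)).getD 0])
    else
      l.foldl (fun c v => c.modify f [] (fun c => c ++ [(vpos.get? |v|).getD 0])) cats
  | none => cats

def get_feature_categories (ivars : List (String × List Int)) (feature_names_as_array_strings : List String) : List (List Int) :=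
  -- ivars' = {str(k): v for k, v in ivars.items()}; categories = the defaultdict fold
  (feature_names_as_array_strings.foldl
      (pvCatStep (PySem.Dict.ofList ivars) (make_varpos (PySem.Dict.ofList ivars)))
      PySem.Dict.empty).values.map (fun ftups => [pvMinI ftups, pvMaxI ftups])

-- ===== PORT B =====

-- B's _varpos: one unified double loop, the advance step (1 per fresh literal for
-- two-literal groups, 0 inside / +1 after otherwise) carried as arithmetic
def pvVarposB (groups : List (List Int)) : PySem.Dict Int Int :=
  (groups.foldl
    (fun (st : PySem.Dict Int Int × Int) lits =>
      let step : Int := if lits.length = 2 then 1 else 0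
      let st2 := (lits.map (fun l => |l|)).foldl
        (fun (st2 : PySem.Dict Int Int × Int) a =>
          if st2.1.contains a then st2 else (st2.1.insert a st2.2, st2.2 + step)) st
      (st2.1, st2.2 + (1 - step)))
    (PySem.Dict.empty, 0)).1

-- B's _events: the (category key, position) pairs one feature name contributes
def pvEvents (iv : PySem.Dict String (List Int)) (vpos : PySem.Dict Int Int)
    (f : String) : List (String × Int) :=
  match iv.get? f with
  | none => []
  | some lits =>
    if lits.length = 2 then [(pvSplit0 f, (vpos.get? (lits.headD 0)).getD 0)]
    else lits.map (fun v => (f, (vpos.get? |v|).getD 0))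

def get_feature_categories_alt (ivars : List (String × List Int)) (feature_names_as_array_strings : List String) : List (List Int) :=
  let iv := PySem.Dict.ofList ivars
  let vpos := pvVarposB iv.values
  let events := feature_names_as_array_strings.flatMap (pvEvents iv vpos)
  let keys := PySem.List.dedup (events.map Prod.fst)   -- list(dict.fromkeys(…))
  keys.map (fun k =>
    let ps := (events.filter (fun e => e.1 == k)).map Prod.snd
    [pvMinI ps, pvMaxI ps])

-- ===== PRECONDITION & SPEC =====
-- Pre_ excludes exactly the inputs where Python A raises KeyError: a referenced length-2
-- entry whose first literal is negative (vpos is keyed by abs values, so that lookup fails).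
def Pre_get_feature_categories (ivars : List (String × List Int)) (feature_names_as_array_strings : List String) : Prop :=
  ∀ p ∈ (PySem.Dict.ofList ivars).items,
    p.1 ∈ feature_names_as_array_strings → p.2.length = 2 → 0 ≤ p.2.headD 0
instance (ivars : List (String × List Int)) (feature_names_as_array_strings : List String) : Decidable (Pre_get_feature_categories ivars feature_names_as_array_strings) := by unfold Pre_get_feature_categories; infer_instance

def pvWitness_get_feature_categories : (List (String × List Int)) × List String :=
  ([("a", [1, 2]), ("c", [3, 4, 5])], ["a", "c"])

def Spec_get_feature_categories (ivars : List (String × List Int)) (feature_names_as_array_strings : List String) (out : List (List Int)) : Prop := out = get_feature_categories_alt ivars feature_names_as_array_strings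
instance (ivars : List (String × List Int)) (feature_names_as_array_strings : List String) (out : List (List Int)) : Decidable (Spec_get_feature_categories ivars feature_names_as_array_strings out) := by unfold Spec_get_feature_categories; infer_instance

-- ===== CLAIM (what is proved, stated in full; the proofs are below) =====
def Claim_equal_get_feature_categories : Prop := ∀ (ivars : List (String × List Int)) (feature_names_as_array_strings : List String), Dom_get_feature_categories ivars feature_names_as_array_strings → Pre_get_feature_categories ivars feature_names_as_array_strings → Spec_get_feature_categories ivars feature_names_as_array_strings (get_feature_categories ivars feature_names_as_array_strings)

-- ===== LEMMAS AND PROOFS =====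

-- B's inner fold with step = 0 keeps the counter fixed and equals A's else-branch fold
theorem pv_inner_step0 (lits : List Int) :
    ∀ (d : PySem.Dict Int Int) (p : Int),
      lits.foldl (fun (st2 : PySem.Dict Int Int × Int) l =>
        if st2.1.contains |l| then st2 else (st2.1.insert |l| st2.2, st2.2 + 0)) (d, p)
      = (lits.foldl (fun vp l => if vp.contains |l| then vp else vp.insert |l| p) d, p) := by
  induction lits with
  | nil => intro d p; rfl
  | cons a t ih =>
    intro d p
    simp only [List.foldl_cons]
    by_cases h : d.contains |a| = true
    · simpa [h] using ih d p
    · simpa [h] using ih (d.insert |a| p) p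

-- B's _varpos computes make_varpos
theorem pv_vpos_eq (d : PySem.Dict String (List Int)) :
    pvVarposB d.values = make_varpos d := by
  unfold pvVarposB make_varpos
  rw [show d.values = d.items.map (fun kv => kv.2) from rfl, List.foldl_map]
  congr 1
  apply PySem.List.foldl_congr_mem
  intro st kv _
  by_cases h2 : kv.2.length = 2
  · simp only [h2, if_pos]
    rw [List.foldl_map]
    simp
  · simp only [h2, if_false]
    rw [List.foldl_map]
    cases st with
    | mk d0 p0 =>
      rw [pv_inner_step0]
      norm_num

-- one A step over a feature equals folding the modify-append step over that feature's events
theorem pv_catStep_events (iv : PySem.Dict String (List Int)) (vp : PySem.Dict Int Int)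
    (c : PySem.Dict String (List Int)) (f : String) :
    pvCatStep iv vp c f
      = (pvEvents iv vp f).foldl (fun c p => c.modify p.1 [] (fun l => l ++ [p.2])) c := by
  unfold pvCatStep pvEvents
  cases h : iv.get? f with
  | none => rfl
  | some l =>
    by_cases h2 : l.length = 2
    · simp [h2]
    · simp only [h2, if_false]
      rw [List.foldl_map]

-- folding group-steps feature by feature is folding them over the flattened event list
theorem pv_foldl_flatMap {α β γ : Type} (g : α → List β) (step : γ → β → γ) :
    ∀ (l : List α) (c : γ),
      l.foldl (fun c x => (g x).foldl step c) c = (l.flatMap g).foldl step c := by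
  intro l
  induction l with
  | nil => intro c; rfl
  | cons x t ih =>
    intro c
    simp only [List.foldl_cons, List.flatMap_cons, List.foldl_append]
    exact ih _

-- ===== VERDICT (by name: the statement is the Claim_ definition above) =====
theorem get_feature_categories_spec : Claim_equal_get_feature_categories := by
  intro ivars fns _ _
  unfold Spec_get_feature_categories
  simp only [get_feature_categories, get_feature_categories_alt]
  rw [pv_vpos_eq]
  set iv := PySem.Dict.ofList ivars
  set vp := make_varpos iv
  set events := fns.flatMap (pvEvents iv vp) with hev
  -- A's category fold is the modify-append fold over the flattened events
  have hfold : fns.foldl (pvCatStep iv vp) PySem.Dict.empty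
      = events.foldl (fun c p => c.modify p.1 [] (fun l => l ++ [p.2])) PySem.Dict.empty := by
    rw [hev, ← pv_foldl_flatMap]
    apply PySem.List.foldl_congr_mem
    intro c f _
    exact pv_catStep_events iv vp c f
  rw [hfold]
  set c := events.foldl (fun c p => c.modify p.1 [] (fun l => l ++ [p.2])) PySem.Dict.empty with hc
  have hkeys : c.keys = PySem.List.dedup (events.map Prod.fst) := by
    rw [hc]
    rw [show (fun (c : PySem.Dict String (List Int)) (p : String × Int) =>
        c.modify p.1 [] (fun l => l ++ [p.2]))
      = (fun c p => c.modify (Prod.fst p) [] ((fun (p : String × Int) (l : List Int) => l ++ [p.2]) p)) from rfl]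
    rw [PySem.Dict.keys_foldl_modify_key]
    simp [PySem.Dict.keys_empty, PySem.Set.update_nil_left, PySem.List.dedup_eq_ofList]
  have hnodup : c.keys.Nodup := by
    rw [hkeys]; rw [PySem.List.dedup_eq_ofList]; exact PySem.Set.nodup_ofList _
  have hvals : c.values = c.keys.map (fun k => c.getD k []) :=
    PySem.Dict.values_eq_map_keys c hnodup []
  rw [hvals, hkeys, List.map_map]
  apply List.map_congr_left
  intro k _
  have hget : c.getD k [] = (events.filter (fun e => e.1 == k)).map Prod.snd := by
    rw [hc, PySem.Dict.getD_foldl_modify_append, PySem.Dict.getD_empty]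
    simp
  simp [Function.comp, hget]
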